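-- pv_equiv track=rewrite | github.com/Satayajit/bias_Detect_dashboard | BiasDetect/bias_detection_dashboard/privacy_checker.py | get_pii_recommendations
-- ===== SOURCE A (Python) =====
-- def get_pii_recommendations(pii_columns):
--     recommendations = []
--     for col in pii_columns:
--         if 'email' in col.lower():
--             recommendations.append(f"Column '{col}' contains email addresses. Consider anonymizing or removing this column.")
--         elif 'phone' in col.lower():
--             recommendations.append(f"Column '{col}' contains phone numbers. Consider anonymizing or removing this column.")
--         elif 'name' in col.lower():
--             recommendations.append(f"Column '{col}' contains names. Consider anonymizing or removing this column.")
--         else: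
--             recommendations.append(f"Column '{col}' may contain PII. Review and consider anonymizing or removing this column.")
--     return recommendations
-- ===== SOURCE B (Python) =====
-- def get_pii_recommendations(pii_columns):
--     # Rule-major staged passes: start with the default message for every column,
--     # then sweep the rules in reverse priority order, overwriting matches so
--     # that the highest-priority keyword's message wins.
--     msgs = ["may contain PII. Review and consider anonymizing or removing this column."] * len(pii_columns)
--     for kw, body in [
--         ('name', "contains names. Consider anonymizing or removing this column."),
--         ('phone', "contains phone numbers. Consider anonymizing or removing this column."),
--         ('email', "contains email addresses. Consider anonymizing or removing this column."),
--     ]: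
--         for i, col in enumerate(pii_columns):
--             if kw in col.lower():
--                 msgs[i] = body
--     return [f"Column '{col}' {m}" for col, m in zip(pii_columns, msgs)]
-- ===== Notes on version B (the rewrite author's own statement) =====
-- stated objective: alternative
-- what changed: Replaces the per-column if/elif/else first-match chain by a rule-major staged computation: a message array initialized to the default, then one full overwrite pass per keyword in reverse priority order (name, phone, email) so the last write is the highest-priority match, then a final zip building the strings.
import Mathlib
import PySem

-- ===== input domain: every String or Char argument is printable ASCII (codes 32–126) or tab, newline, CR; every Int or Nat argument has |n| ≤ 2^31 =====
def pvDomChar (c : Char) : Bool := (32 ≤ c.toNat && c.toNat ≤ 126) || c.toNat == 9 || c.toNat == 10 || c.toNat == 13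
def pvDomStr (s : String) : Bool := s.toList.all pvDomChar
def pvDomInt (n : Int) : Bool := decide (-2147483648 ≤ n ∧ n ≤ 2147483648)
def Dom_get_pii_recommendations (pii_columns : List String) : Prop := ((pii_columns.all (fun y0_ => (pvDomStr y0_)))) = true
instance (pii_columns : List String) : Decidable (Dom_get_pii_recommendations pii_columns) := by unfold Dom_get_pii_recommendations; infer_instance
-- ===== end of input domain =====

-- B replaces A's per-column if/elif/else chain by a rule-major staged computation:
-- default messages first, then one overwrite pass per keyword in reverse priority
-- order (last write = highest priority), then a final zip; an alternative of equal cost.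

-- ===== PORT A =====
def get_pii_recommendations (pii_columns : List String) : List String :=
  pii_columns.foldl (fun recommendations col =>
    if PySem.Str.isIn "email" (PySem.Str.lower col) then
      recommendations ++ ["Column '" ++ col ++ "' contains email addresses. Consider anonymizing or removing this column."]
    else if PySem.Str.isIn "phone" (PySem.Str.lower col) then
      recommendations ++ ["Column '" ++ col ++ "' contains phone numbers. Consider anonymizing or removing this column."]
    else if PySem.Str.isIn "name" (PySem.Str.lower col) then
      recommendations ++ ["Column '" ++ col ++ "' contains names. Consider anonymizing or removing this column."]
    else
      recommendations ++ ["Column '" ++ col ++ "' may contain PII. Review and consider anonymizing or removing this column."]) []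

-- ===== PORT B =====
-- the reverse-priority rule list of Source B
def pvPiiStages : List (String × String) :=
  [("name",  "contains names. Consider anonymizing or removing this column."),
   ("phone", "contains phone numbers. Consider anonymizing or removing this column."),
   ("email", "contains email addresses. Consider anonymizing or removing this column.")]

def pvPiiDefault : String := "may contain PII. Review and consider anonymizing or removing this column."

-- the inner indexed loop 'for i, col in enumerate(...): if kw in col.lower(): msgs[i] = body'
def pvPiiPass (pii_columns : List String) (kw body : String) (msgs : List String) : List String :=
  List.zipWith (fun col m => if PySem.Str.isIn kw (PySem.Str.lower col) then body else m) pii_columns msgs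

def get_pii_recommendations_alt (pii_columns : List String) : List String :=
  let msgs0 := List.replicate pii_columns.length pvPiiDefault
  let msgs := pvPiiStages.foldl (fun msgs r => pvPiiPass pii_columns r.1 r.2 msgs) msgs0
  List.zipWith (fun col m => "Column '" ++ col ++ "' " ++ m) pii_columns msgs

-- ===== PRECONDITION & SPEC =====
def Spec_get_pii_recommendations (pii_columns : List String) (out : List String) : Prop := out = get_pii_recommendations_alt pii_columns
instance (pii_columns : List String) (out : List String) : Decidable (Spec_get_pii_recommendations pii_columns out) := by unfold Spec_get_pii_recommendations; infer_instance

-- ===== CLAIM (what is proved, stated in full; the proofs are below) =====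
def Claim_equal_get_pii_recommendations : Prop := ∀ (pii_columns : List String), Dom_get_pii_recommendations pii_columns → Spec_get_pii_recommendations pii_columns (get_pii_recommendations pii_columns)

-- ===== LEMMAS AND PROOFS =====

theorem zipWith_map_right {α β γ : Type} (f : α → β → γ) (g : α → β) (l : List α) :
    List.zipWith f l (l.map g) = l.map (fun a => f a (g a)) := by
  induction l with
  | nil => rfl
  | cons x xs ih => simp [List.zipWith, ih]

-- one overwrite pass, applied to a map, fuses into a map
theorem pass_map (pii_columns : List String) (kw body : String) (g : String → String) :
    pvPiiPass pii_columns kw body (pii_columns.map g)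
      = pii_columns.map (fun col => if PySem.Str.isIn kw (PySem.Str.lower col) then body else g col) := by
  unfold pvPiiPass
  exact zipWith_map_right _ _ _

-- A's loop is the corresponding map, built through an accumulator
theorem pii_foldl (xs : List String) (acc : List String) :
    xs.foldl (fun recommendations col =>
      if PySem.Str.isIn "email" (PySem.Str.lower col) then
        recommendations ++ ["Column '" ++ col ++ "' contains email addresses. Consider anonymizing or removing this column."]
      else if PySem.Str.isIn "phone" (PySem.Str.lower col) then
        recommendations ++ ["Column '" ++ col ++ "' contains phone numbers. Consider anonymizing or removing this column."]
      else if PySem.Str.isIn "name" (PySem.Str.lower col) then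
        recommendations ++ ["Column '" ++ col ++ "' contains names. Consider anonymizing or removing this column."]
      else
        recommendations ++ ["Column '" ++ col ++ "' may contain PII. Review and consider anonymizing or removing this column."]) acc
    = acc ++ xs.map (fun col =>
      if PySem.Str.isIn "email" (PySem.Str.lower col) then
        "Column '" ++ col ++ "' contains email addresses. Consider anonymizing or removing this column."
      else if PySem.Str.isIn "phone" (PySem.Str.lower col) then
        "Column '" ++ col ++ "' contains phone numbers. Consider anonymizing or removing this column."
      else if PySem.Str.isIn "name" (PySem.Str.lower col) then
        "Column '" ++ col ++ "' contains names. Consider anonymizing or removing this column."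
      else
        "Column '" ++ col ++ "' may contain PII. Review and consider anonymizing or removing this column.") := by
  induction xs generalizing acc with
  | nil => simp
  | cons x xs ih =>
    simp only [List.foldl, List.map]
    rw [ih]
    by_cases he : PySem.Str.isIn "email" (PySem.Str.lower x) <;>
      by_cases hp : PySem.Str.isIn "phone" (PySem.Str.lower x) <;>
        by_cases hn : PySem.Str.isIn "name" (PySem.Str.lower x) <;>
          simp only [he, hp, hn, if_true, if_false, ite_true, ite_false] <;>
            simp [List.append_assoc]

-- ===== VERDICT (by name: the statement is the Claim_ definition above) =====
theorem get_pii_recommendations_spec : Claim_equal_get_pii_recommendations := by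
  intro pii_columns _
  unfold Spec_get_pii_recommendations get_pii_recommendations get_pii_recommendations_alt
  rw [pii_foldl]
  simp only [List.nil_append]
  have h0 : List.replicate pii_columns.length pvPiiDefault
      = pii_columns.map (fun _ => pvPiiDefault) := by
    rw [List.map_const']
  rw [h0]
  simp only [pvPiiStages, List.foldl, pass_map]
  rw [zipWith_map_right]
  refine List.map_congr_left (fun col _ => ?_)
  simp only [PySem.Str.isIn, PySem.Str.lower]
  by_cases he : PySem.Chars.isIn ['e','m','a','i','l'] (PySem.Chars.lower col.toList) <;>
    by_cases hp : PySem.Chars.isIn ['p','h','o','n','e'] (PySem.Chars.lower col.toList) <;>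
      by_cases hn : PySem.Chars.isIn ['n','a','m','e'] (PySem.Chars.lower col.toList) <;>
        simp [he, hp, hn, pvPiiDefault, String.append_assoc]
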